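-- pv_equiv track=rewrite | github.com/zorgster/texi-trace | src/texi_trace/chromatogram/quality.py | find_quality_regions
-- ===== SOURCE A (Python) =====
-- from typing import Dict, List, Tuple
--
-- def find_quality_regions(quality_scores: List[int],
--                        min_quality: int = 20,
--                        min_length: int = 10) -> List[Tuple[int, int]]:
--     """
--     Find continuous regions of good quality sequence.
--
--     Args:
--         quality_scores: List of Phred quality scores
--         min_quality: Minimum quality threshold
--         min_length: Minimum length of good quality region
--
--     Returns:
--         List of tuples (start, end) for good quality regions
--     """
--     if not quality_scores:
--         return []
--
--     good_regions = []
--     current_start = None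
--
--     for i, score in enumerate(quality_scores):
--         if score >= min_quality:
--             if current_start is None:
--                 current_start = i
--         else:
--             if current_start is not None:
--                 region_length = i - current_start
--                 if region_length >= min_length:
--                     good_regions.append((current_start, i))
--                 current_start = None
--
--     # Handle region that extends to end of sequence
--     if current_start is not None:
--         region_length = len(quality_scores) - current_start
--         if region_length >= min_length:
--             good_regions.append((current_start, len(quality_scores)))
--
--     return good_regions
-- ===== SOURCE B (Python) =====
-- from typing import List, Tuple
--
-- def find_quality_regions(quality_scores: List[int],
--                          min_quality: int = 20,
--                          min_length: int = 10) -> List[Tuple[int, int]]: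
--     # Edge detection: compute the boolean mask, shift it both ways, and read
--     # region boundaries off the mask/shifted-mask comparisons; then pair the
--     # k-th start with the k-th end and filter by length.
--     good = [q >= min_quality for q in quality_scores]
--     prev = [False] + good[:-1]
--     nxt = good[1:] + [False]
--     starts = [i for i, (g, p) in enumerate(zip(good, prev)) if g and not p]
--     ends = [i + 1 for i, (g, x) in enumerate(zip(good, nxt)) if g and not x]
--     return [(s, e) for s, e in zip(starts, ends) if e - s >= min_length]
-- ===== Notes on version B (the rewrite author's own statement) =====
-- stated objective: alternative
-- what changed: Replaces A's stateful current_start scan (with a trailing-region epilogue) by mask-based edge detection: build the boolean mask, compare it with its two shifts to list region starts and (exclusive) ends, then zip the k-th start with the k-th end and filter by length; no run state and no end-of-sequence special case.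
import Mathlib
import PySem

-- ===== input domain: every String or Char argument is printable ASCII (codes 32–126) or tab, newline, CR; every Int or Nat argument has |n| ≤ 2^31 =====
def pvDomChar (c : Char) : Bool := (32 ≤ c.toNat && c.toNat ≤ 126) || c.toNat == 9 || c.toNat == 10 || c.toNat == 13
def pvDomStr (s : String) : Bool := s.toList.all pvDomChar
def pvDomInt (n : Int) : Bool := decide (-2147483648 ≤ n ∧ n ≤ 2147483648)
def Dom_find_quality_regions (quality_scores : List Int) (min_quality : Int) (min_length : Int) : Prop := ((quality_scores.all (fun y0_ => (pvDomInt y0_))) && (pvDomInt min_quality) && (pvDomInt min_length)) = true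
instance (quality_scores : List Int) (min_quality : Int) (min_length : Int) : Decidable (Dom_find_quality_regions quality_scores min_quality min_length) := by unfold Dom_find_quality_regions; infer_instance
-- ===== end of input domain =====

-- B replaces A's stateful current_start scan by mask edge detection: boundaries read off the
-- mask and its two shifts, then starts zipped with ends and filtered by length (objective: alternative).

-- ===== PORT A =====
-- A's for-loop: state = (good_regions, current_start), index i; returns (acc, current_start) after the loop.
def fqrLoop (min_quality min_length : Int) :
    List Int → Int → Option Int → List (Int × Int) → List (Int × Int) × Option Int
  | [], _, cs, acc => (acc, cs)
  | score :: rest, i, cs, acc =>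
    if min_quality ≤ score then
      fqrLoop min_quality min_length rest (i + 1)
        (match cs with | none => some i | some s => some s) acc
    else
      match cs with
      | some s =>
          fqrLoop min_quality min_length rest (i + 1) none
            (if min_length ≤ i - s then acc ++ [(s, i)] else acc)
      | none => fqrLoop min_quality min_length rest (i + 1) none acc

def find_quality_regions (quality_scores : List Int) (min_quality : Int) (min_length : Int) : List (Int × Int) :=
  if quality_scores = [] then []
  else
    let r := fqrLoop min_quality min_length quality_scores 0 none []
    -- Handle region that extends to end of sequence
    match r.2 with
    | some s =>
        if min_length ≤ (quality_scores.length : Int) - s then r.1 ++ [(s, (quality_scores.length : Int))]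
        else r.1
    | none => r.1

-- ===== PORT B =====
-- Source B: good = mask; prev = [False] + good[:-1] (dropLast is exact for [:-1]); nxt = good[1:] + [False]
-- (drop 1 is exact for [1:]); starts/ends via enumerate(zip(...)); zip starts ends, filter by length.
def find_quality_regions_alt (quality_scores : List Int) (min_quality : Int) (min_length : Int) : List (Int × Int) :=
  let good := quality_scores.map (fun q => decide (min_quality ≤ q))
  let prev := false :: good.dropLast
  let nxt := good.drop 1 ++ [false]
  let starts := ((PySem.List.enumerate (good.zip prev) 0).filter (fun q => q.2.1 && !q.2.2)).map (fun q => q.1)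
  let ends := ((PySem.List.enumerate (good.zip nxt) 0).filter (fun q => q.2.1 && !q.2.2)).map (fun q => q.1 + 1)
  (starts.zip ends).filter (fun se => decide (min_length ≤ se.2 - se.1))

-- ===== PRECONDITION & SPEC =====
def Spec_find_quality_regions (quality_scores : List Int) (min_quality : Int) (min_length : Int) (out : List (Int × Int)) : Prop := out = find_quality_regions_alt quality_scores min_quality min_length
instance (quality_scores : List Int) (min_quality : Int) (min_length : Int) (out : List (Int × Int)) : Decidable (Spec_find_quality_regions quality_scores min_quality min_length out) := by unfold Spec_find_quality_regions; infer_instance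

-- ===== CLAIM (what is proved, stated in full; the proofs are below) =====
def Claim_equal_find_quality_regions : Prop := ∀ (quality_scores : List Int) (min_quality : Int) (min_length : Int), Dom_find_quality_regions quality_scores min_quality min_length → Spec_find_quality_regions quality_scores min_quality min_length (find_quality_regions quality_scores min_quality min_length)

-- ===== LEMMAS AND PROOFS =====

-- the common specification both ports are reduced to: maximal good runs, front to back
def fqrRuns (min_quality min_length : Int) : List Int → Int → List (Int × Int)
  | [], _ => []
  | x :: rest, i =>
    let key := decide (min_quality ≤ x)
    let run := rest.takeWhile (fun y => decide (min_quality ≤ y) == key)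
    let rest' := rest.dropWhile (fun y => decide (min_quality ≤ y) == key)
    let n : Int := (1 : Int) + run.length
    (if key = true ∧ min_length ≤ n then [(i, i + n)] else []) ++
      fqrRuns min_quality min_length rest' (i + n)
termination_by xs _ => xs.length
decreasing_by
  simp only [List.length_cons]
  exact Nat.lt_succ_of_le (List.length_dropWhile_le _ _)

-- closing/finishing A's loop result at absolute end index `e`
def fqrFinish (min_length : Int) (r : List (Int × Int) × Option Int) (e : Int) : List (Int × Int) :=
  match r.2 with
  | some s => if min_length ≤ e - s then r.1 ++ [(s, e)] else r.1
  | none => r.1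

-- recursive characterisations of B's start/end boundary lists
def sRec : Bool → List Bool → Int → List Int
  | _, [], _ => []
  | p, b :: t, i => (if b && !p then [i] else []) ++ sRec b t (i + 1)

def eRec : List Bool → Int → List Int
  | [], _ => []
  | b :: t, i => (if b && !(t.headD false) then [i + 1] else []) ++ eRec t (i + 1)

theorem dropWhile_head_false {α : Type} (p : α → Bool) :
    ∀ (l : List α) (y : α) (ys : List α), l.dropWhile p = y :: ys → p y = false := by
  intro l
  induction l with
  | nil => intro y ys h; simp [List.dropWhile] at h
  | cons a as ih =>
    intro y ys h
    by_cases hp : p a = true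
    · exact ih y ys (by simpa [List.dropWhile, hp] using h)
    · rw [List.dropWhile_cons, if_neg hp] at h
      obtain ⟨h1, -⟩ := List.cons.inj h
      subst h1
      exact Bool.eq_false_iff.mpr hp

theorem fqrLoop_good (mq ml : Int) :
    ∀ (run : List Int), (∀ x ∈ run, mq ≤ x) →
      ∀ (rest : List Int) (i s : Int) (acc : List (Int × Int)),
        fqrLoop mq ml (run ++ rest) i (some s) acc = fqrLoop mq ml rest (i + run.length) (some s) acc := by
  intro run
  induction run with
  | nil => intro _ rest i s acc; simp
  | cons x xs ih =>
    intro h rest i s acc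
    have hx : mq ≤ x := h x (by simp)
    simp only [List.cons_append, fqrLoop, if_pos hx]
    rw [ih (fun y hy => h y (by simp [hy]))]
    congr 1
    simp only [List.length_cons]
    push_cast
    ring

-- a run of below-threshold scores at the front of the spec's input contributes only an index shift
theorem fqrRuns_bad_run (mq ml : Int) (zs : List Int) (k : Int) :
    fqrRuns mq ml zs k
      = fqrRuns mq ml (zs.dropWhile (fun w => decide (mq ≤ w) == false))
          (k + ((zs.takeWhile (fun w => decide (mq ≤ w) == false)).length : Int)) := by
  cases zs with
  | nil => simp [fqrRuns]
  | cons z zr =>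
    by_cases hz : mq ≤ z
    · have ht : (z :: zr).takeWhile (fun w => decide (mq ≤ w) == false) = [] := by
        simp [hz]
      have hd : (z :: zr).dropWhile (fun w => decide (mq ≤ w) == false) = z :: zr := by
        simp [hz]
      rw [ht, hd]
      simp
    · have hzf : decide (mq ≤ z) = false := by simp [hz]
      have ht : (z :: zr).takeWhile (fun w => decide (mq ≤ w) == false)
          = z :: zr.takeWhile (fun w => decide (mq ≤ w) == false) := by
        simp [hz]
      have hd : (z :: zr).dropWhile (fun w => decide (mq ≤ w) == false)
          = zr.dropWhile (fun w => decide (mq ≤ w) == false) := by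
        simp [hz]
      rw [ht, hd]
      conv_lhs => rw [fqrRuns]
      simp only [hzf]
      rw [if_neg (by simp)]
      simp only [List.nil_append, List.length_cons]
      congr 1
      push_cast
      ring

theorem fqrRuns_skip_bad (mq ml : Int) (ys : List Int) (y j : Int) (hy : ¬ mq ≤ y) :
    fqrRuns mq ml (y :: ys) j = fqrRuns mq ml ys (j + 1) := by
  have hkey : decide (mq ≤ y) = false := by simp [hy]
  rw [fqrRuns]
  simp only [hkey]
  rw [if_neg (by simp)]
  rw [List.nil_append]
  rw [fqrRuns_bad_run mq ml ys (j + 1)]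
  congr 1
  ring

-- ===== A-side: A's loop equals the run spec =====
theorem fqr_main (mq ml : Int) :
    ∀ (n : Nat) (xs : List Int), xs.length ≤ n → ∀ (i : Int) (acc : List (Int × Int)),
      fqrFinish ml (fqrLoop mq ml xs i none acc) (i + xs.length) = acc ++ fqrRuns mq ml xs i := by
  intro n
  induction n with
  | zero =>
    intro xs hl i acc
    have : xs = [] := List.length_eq_zero_iff.mp (Nat.le_zero.mp hl)
    subst this
    simp [fqrLoop, fqrFinish, fqrRuns]
  | succ n ih =>
    intro xs hl i acc
    cases xs with
    | nil => simp [fqrLoop, fqrFinish, fqrRuns]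
    | cons x rest =>
      by_cases hx : mq ≤ x
      · have hkey : decide (mq ≤ x) = true := by simp [hx]
        set p : Int → Bool := fun y => decide (mq ≤ y) == true with hp
        set L : Int := ((rest.takeWhile p).length : Int) with hL
        have hsplit : rest.takeWhile p ++ rest.dropWhile p = rest := List.takeWhile_append_dropWhile
        have hgood : ∀ y ∈ rest.takeWhile p, mq ≤ y := by
          intro y hy
          have := List.mem_takeWhile_imp hy
          simpa [hp] using this
        have hstep : fqrLoop mq ml (x :: rest) i none acc
            = fqrLoop mq ml (rest.dropWhile p) (i + 1 + L) (some i) acc := by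
          simp only [fqrLoop, if_pos hx]
          conv_lhs => rw [← hsplit]
          rw [fqrLoop_good mq ml _ hgood]
        have hlen : rest.length = (rest.takeWhile p).length + (rest.dropWhile p).length := by
          have h2 := congrArg List.length hsplit
          simp only [List.length_append] at h2
          omega
        have hruns : fqrRuns mq ml (x :: rest) i
            = (if ml ≤ 1 + L then [(i, i + (1 + L))] else []) ++
              fqrRuns mq ml (rest.dropWhile p) (i + (1 + L)) := by
          rw [fqrRuns]
          simp only [hkey, hp, hL]
          simp
        rw [hstep, hruns]
        cases hdrop : rest.dropWhile p with
        | nil =>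
          have hlen2 : rest.length = (rest.takeWhile p).length := by
            rw [hlen, hdrop]; simp
          have hxr : (((x :: rest).length : Nat) : Int) = 1 + L := by
            simp only [List.length_cons]
            rw [hL, hlen2]
            push_cast
            ring
          simp only [fqrLoop, fqrFinish, hxr]
          rw [fqrRuns]
          rw [List.append_nil]
          have harith : i + (1 + L) - i = 1 + L := by ring
          rw [harith]
          split_ifs
          · simp
          · simp
        | cons y ys =>
          have hybad : ¬ mq ≤ y := by
            have := dropWhile_head_false p rest y ys hdrop
            simp only [hp] at this
            simpa using this
          simp only [fqrLoop]
          rw [if_neg hybad]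
          have hys : ys.length ≤ n := by
            have h1 : (rest.dropWhile p).length ≤ rest.length := List.length_dropWhile_le _ _
            rw [hdrop] at h1
            simp only [List.length_cons] at hl h1
            omega
          have hend : i + (((x :: rest).length : Nat) : Int)
              = (i + 1 + L + 1) + (ys.length : Int) := by
            simp only [List.length_cons]
            rw [hL]
            have : rest.length = (rest.takeWhile p).length + (ys.length + 1) := by
              rw [hlen, hdrop]; simp
            rw [this]
            push_cast
            ring
          rw [hend, ih ys hys]
          rw [fqrRuns_skip_bad mq ml ys y (i + (1 + L)) hybad]
          have hidx : i + (1 + L) + 1 = i + 1 + L + 1 := by ring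
          rw [hidx]
          by_cases hml : ml ≤ 1 + L
          · rw [if_pos (show ml ≤ i + 1 + L - i by omega), if_pos hml]
            simp only [List.append_assoc, List.cons_append, List.nil_append]
            congr 3
            ring
          · rw [if_neg (show ¬ ml ≤ i + 1 + L - i by omega), if_neg hml]
            simp
      · rw [fqrRuns_skip_bad mq ml rest x i hx]
        simp only [fqrLoop, if_neg hx]
        have hr : rest.length ≤ n := by
          simp only [List.length_cons] at hl; omega
        have hend : i + (((x :: rest).length : Nat) : Int) = (i + 1) + (rest.length : Int) := by
          simp only [List.length_cons]; push_cast; ring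
        rw [hend]
        exact ih rest hr (i + 1) acc

-- ===== B-side bridges: the enumerate/zip/filter comprehensions equal sRec / eRec =====
theorem bridgeS : ∀ (t : List Bool) (p : Bool) (i : Int),
    ((PySem.List.enumerate (t.zip (p :: t.dropLast)) i).filter (fun q => q.2.1 && !q.2.2)).map (fun q => q.1)
      = sRec p t i := by
  intro t
  induction t with
  | nil => intro p i; simp [sRec]
  | cons b u ih =>
    intro p i
    have hz : (b :: u).zip (p :: (b :: u).dropLast) = (b, p) :: u.zip (b :: u.dropLast) := by
      cases u with
      | nil => simp
      | cons c v => simp [List.zip]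
    rw [hz, PySem.List.enumerate_cons]
    rw [sRec]
    by_cases hbp : (b && !p) = true
    · rw [List.filter_cons_of_pos (by simpa using hbp)]
      simp only [List.map_cons, hbp]
      rw [ih]
      rfl
    · rw [List.filter_cons_of_neg (by simpa using hbp)]
      simp only [hbp]
      rw [if_neg Bool.false_ne_true]
      rw [ih]
      rfl

theorem bridgeE : ∀ (t : List Bool) (i : Int),
    ((PySem.List.enumerate (t.zip (t.drop 1 ++ [false])) i).filter (fun q => q.2.1 && !q.2.2)).map (fun q => q.1 + 1)
      = eRec t i := by
  intro t
  induction t with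
  | nil => intro i; simp [eRec]
  | cons b u ih =>
    intro i
    have hz : (b :: u).zip ((b :: u).drop 1 ++ [false]) = (b, u.headD false) :: u.zip (u.drop 1 ++ [false]) := by
      cases u with
      | nil => simp
      | cons c v => simp [List.zip]
    rw [hz, PySem.List.enumerate_cons]
    rw [eRec]
    by_cases hbp : (b && !(u.headD false)) = true
    · rw [List.filter_cons_of_pos (by simpa using hbp)]
      simp only [List.map_cons, hbp]
      rw [ih]
      rfl
    · rw [List.filter_cons_of_neg (by simpa using hbp)]
      simp only [hbp]
      rw [if_neg Bool.false_ne_true]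
      rw [ih]
      rfl

-- run-consumption lemmas for sRec / eRec
theorem sRec_all_true : ∀ (run : List Bool), (∀ b ∈ run, b = true) →
    ∀ (z : List Bool) (i : Int), sRec true (run ++ z) i = sRec true z (i + run.length) := by
  intro run
  induction run with
  | nil => intro _ z i; simp
  | cons r rr ih =>
    intro h z i
    have hr : r = true := h r (by simp)
    subst hr
    rw [List.cons_append, sRec]
    simp only [Bool.not_true, Bool.and_false]
    rw [if_neg (by simp)]
    rw [List.nil_append, ih (fun b hb => h b (by simp [hb]))]
    congr 1
    simp only [List.length_cons]
    push_cast
    ring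

theorem eRec_run : ∀ (run : List Bool), run ≠ [] → (∀ b ∈ run, b = true) →
    ∀ (z : List Bool), z.headD false = false →
      ∀ (i : Int), eRec (run ++ z) i = (i + run.length) :: eRec z (i + run.length) := by
  intro run
  induction run with
  | nil => intro h; exact absurd rfl h
  | cons r rr ih =>
    intro _ h z hz i
    have hr : r = true := h r (by simp)
    subst hr
    cases rr with
    | nil =>
      rw [List.cons_append, List.nil_append, eRec]
      simp only [hz]
      rw [if_pos (by simp)]
      simp
    | cons r2 rs =>
      have hr2 : r2 = true := h r2 (by simp)
      rw [List.cons_append, eRec]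
      have hhead : ((r2 :: rs) ++ z).headD false = true := by simp [hr2]
      rw [hhead]
      rw [if_neg (by simp)]
      rw [List.nil_append, ih (by simp) (fun b hb => h b (by simp [hb])) z hz (i + 1)]
      have hlen : i + 1 + ((r2 :: rs).length : Int) = i + ((true :: r2 :: rs).length : Int) := by
        simp only [List.length_cons]; push_cast; ring
      rw [hlen]

-- ===== B-side main: zipped boundary lists, filtered by length, equal the run spec =====
theorem fqrB_main (mq ml : Int) :
    ∀ (n : Nat) (xs : List Int), xs.length ≤ n → ∀ (i : Int),
      ((sRec false (xs.map (fun q => decide (mq ≤ q))) i).zip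
          (eRec (xs.map (fun q => decide (mq ≤ q))) i)).filter
        (fun se => decide (ml ≤ se.2 - se.1)) = fqrRuns mq ml xs i := by
  intro n
  induction n with
  | zero =>
    intro xs hl i
    have : xs = [] := List.length_eq_zero_iff.mp (Nat.le_zero.mp hl)
    subst this
    simp [sRec, eRec, fqrRuns]
  | succ n ih =>
    intro xs hl i
    cases xs with
    | nil => simp [sRec, eRec, fqrRuns]
    | cons x rest =>
      by_cases hx : mq ≤ x
      · have hkey : decide (mq ≤ x) = true := by simp [hx]
        set p : Int → Bool := fun y => decide (mq ≤ y) == true with hp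
        set run := rest.takeWhile p with hrun
        set rest' := rest.dropWhile p with hrest'
        set L : Int := (run.length : Int) with hL
        have hsplit : run ++ rest' = rest := List.takeWhile_append_dropWhile
        have hmask : rest.map (fun q => decide (mq ≤ q))
            = run.map (fun q => decide (mq ≤ q)) ++ rest'.map (fun q => decide (mq ≤ q)) := by
          rw [← List.map_append, hsplit]
        have hrun_true : ∀ b ∈ run.map (fun q => decide (mq ≤ q)), b = true := by
          intro b hb
          obtain ⟨y, hy, rfl⟩ := List.mem_map.mp hb
          have := List.mem_takeWhile_imp hy
          simpa [hp] using this
        have hheadz : (rest'.map (fun q => decide (mq ≤ q))).headD false = false := by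
          cases hdrop : rest' with
          | nil => simp
          | cons y ys =>
            have := dropWhile_head_false p rest y ys (by rw [← hrest', hdrop])
            simp only [hp] at this
            simp [List.headD]
            simpa using this
        have hrunlen : ((run.map (fun q => decide (mq ≤ q))).length : Int) = L := by
          simp [hL]
        -- sRec side
        have hs : sRec false ((x :: rest).map (fun q => decide (mq ≤ q))) i
            = i :: sRec true (rest'.map (fun q => decide (mq ≤ q))) (i + 1 + L) := by
          rw [List.map_cons, hkey, sRec]
          rw [if_pos (by simp)]
          rw [hmask, sRec_all_true _ hrun_true]
          rw [hrunlen]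
          rfl
        -- eRec side
        have he : eRec ((x :: rest).map (fun q => decide (mq ≤ q))) i
            = (i + (1 + L)) :: eRec (rest'.map (fun q => decide (mq ≤ q))) (i + 1 + L) := by
          rw [List.map_cons, hkey, hmask]
          have := eRec_run (true :: run.map (fun q => decide (mq ≤ q))) (by simp)
            (fun b hb => by rcases List.mem_cons.mp hb with h | h; exacts [h, hrun_true b h])
            (rest'.map (fun q => decide (mq ≤ q))) hheadz i
          rw [← List.cons_append, this]
          have hlen : i + ((true :: run.map (fun q => decide (mq ≤ q))).length : Int) = i + (1 + L) := by
            simp only [List.length_cons]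
            rw [← hrunlen]
            push_cast
            ring
          rw [hlen]
          rw [show i + (1 + L) = i + 1 + L by ring]
        have hruns : fqrRuns mq ml (x :: rest) i
            = (if ml ≤ 1 + L then [(i, i + (1 + L))] else []) ++
              fqrRuns mq ml rest' (i + (1 + L)) := by
          rw [fqrRuns]
          simp only [hkey, hp, hL, hrun, hrest']
          simp
        rw [hs, he, hruns]
        rw [List.zip_cons_cons]
        have htail : ((sRec true (rest'.map (fun q => decide (mq ≤ q))) (i + 1 + L)).zip
              (eRec (rest'.map (fun q => decide (mq ≤ q))) (i + 1 + L))).filter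
            (fun se => decide (ml ≤ se.2 - se.1)) = fqrRuns mq ml rest' (i + (1 + L)) := by
          cases hdrop : rest' with
          | nil => simp [sRec, eRec, fqrRuns]
          | cons y ys =>
            have hybad : ¬ mq ≤ y := by
              have := dropWhile_head_false p rest y ys (by rw [← hrest', hdrop])
              simp only [hp] at this
              simpa using this
            have hykey : decide (mq ≤ y) = false := by simp [hybad]
            rw [List.map_cons, hykey]
            rw [sRec]
            rw [if_neg (by simp)]
            rw [List.nil_append]
            rw [eRec]
            rw [if_neg (by simp)]
            rw [List.nil_append]
            have hys : ys.length ≤ n := by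
              have h1 : rest'.length ≤ rest.length := by
                rw [hrest']; exact List.length_dropWhile_le _ _
              rw [hdrop] at h1
              simp only [List.length_cons] at hl h1
              omega
            rw [ih ys hys (i + 1 + L + 1)]
            rw [fqrRuns_skip_bad mq ml ys y (i + (1 + L)) hybad]
            congr 1
            ring
        rw [List.filter_cons]
        have harith : i + (1 + L) - i = 1 + L := by ring
        simp only [harith]
        by_cases hml : ml ≤ 1 + L
        · rw [if_pos (by simpa using hml), if_pos hml]
          rw [htail]
          rfl
        · rw [if_neg (by simpa using hml), if_neg hml]
          rw [htail]
          rfl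
      · have hkey : decide (mq ≤ x) = false := by simp [hx]
        rw [List.map_cons, hkey]
        rw [sRec]
        rw [if_neg (by simp)]
        rw [List.nil_append]
        rw [eRec]
        rw [if_neg (by simp)]
        rw [List.nil_append]
        have hr : rest.length ≤ n := by
          simp only [List.length_cons] at hl; omega
        rw [ih rest hr (i + 1)]
        rw [fqrRuns_skip_bad mq ml rest x i hx]

-- ===== VERDICT (by name: the statement is the Claim_ definition above) =====
theorem find_quality_regions_spec : Claim_equal_find_quality_regions := by
  intro qs mq ml _
  unfold Spec_find_quality_regions
  have hB : find_quality_regions_alt qs mq ml = fqrRuns mq ml qs 0 := by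
    simp only [find_quality_regions_alt]
    rw [bridgeS, bridgeE]
    exact fqrB_main mq ml qs.length qs (le_refl _) 0
  rw [hB]
  unfold find_quality_regions
  by_cases h : qs = []
  · subst h; simp [fqrRuns]
  · rw [if_neg h]
    have := fqr_main mq ml qs.length qs (le_refl _) 0 []
    simp only [List.nil_append, zero_add] at this
    rw [← this]
    rfl
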